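-- pv_equiv track=rewrite | github.com/matthewnechita/sEMG-Drive | eval_metrics/realtime_behavior_metrics.py | _segment_rows
-- ===== SOURCE A (Python) =====
-- def _segment_rows(rows):
--     segments = []
--     current = []
--     current_label = None
--     for row in rows:
--         label = str(row.get("prompt_label", "")).strip()
--         if not label:
--             continue
--         if current and label != current_label:
--             segments.append(current)
--             current = []
--         current.append(row)
--         current_label = label
--     if current:
--         segments.append(current)
--     return segments
-- ===== SOURCE B (Python) =====
-- def _segment_rows(rows):
--     # Reverse pass building the output back-to-front: prepend each labelled row
--     # to the front group of a key-tagged accumulator.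
--     acc = []  # list of (key, group) pairs, in final order
--     for row in reversed(rows):
--         k = str(row.get("prompt_label", "")).strip()
--         if not k:
--             continue
--         if acc and acc[0][0] == k:
--             acc[0][1].insert(0, row)
--         else:
--             acc.insert(0, (k, [row]))
--     return [g for _, g in acc]
-- ===== Notes on version B (the rewrite author's own statement) =====
-- stated objective: alternative
-- what changed: B iterates the rows in reverse and prepends each labelled row to the front group of a key-tagged accumulator (building the output back-to-front), instead of A's forward state machine that flushes a current-buffer on label change.
import Mathlib
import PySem

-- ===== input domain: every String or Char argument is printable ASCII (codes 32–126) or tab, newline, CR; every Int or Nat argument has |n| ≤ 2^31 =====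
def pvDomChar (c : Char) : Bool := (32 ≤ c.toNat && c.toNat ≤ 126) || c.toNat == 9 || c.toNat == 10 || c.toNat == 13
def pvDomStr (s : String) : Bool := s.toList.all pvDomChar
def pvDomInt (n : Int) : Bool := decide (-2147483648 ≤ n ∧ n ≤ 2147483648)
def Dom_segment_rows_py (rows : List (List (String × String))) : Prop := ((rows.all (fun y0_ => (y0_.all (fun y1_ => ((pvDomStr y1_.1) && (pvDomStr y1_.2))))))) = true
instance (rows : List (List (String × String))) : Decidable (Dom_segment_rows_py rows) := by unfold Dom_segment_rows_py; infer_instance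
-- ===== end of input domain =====

-- B builds the output back-to-front: a reverse pass prepending each labelled row onto the
-- front group of a key-tagged accumulator, instead of A's forward current/current_label machine.

-- shared key helper: str(row.get("prompt_label", "")).strip()  (values are strings, so str() is identity)
def pvKey (row : List (String × String)) : String :=
  PySem.Str.strip ((PySem.Dict.mk row).getD "prompt_label" "")

-- ===== PORT A =====
-- the for-loop over rows with state (segments, current, current_label)
def segGoA (rows : List (List (String × String))) (segs : List (List (List (String × String))))
    (cur : List (List (String × String))) (lbl : Option String) :
    List (List (List (String × String))) :=
  match rows with
  | [] => if cur = [] then segs else segs ++ [cur]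
  | row :: rest =>
    let label := pvKey row
    if label = "" then segGoA rest segs cur lbl
    else if cur ≠ [] ∧ some label ≠ lbl then
      segGoA rest (segs ++ [cur]) [row] (some label)
    else
      segGoA rest segs (cur ++ [row]) (some label)

def segment_rows_py (rows : List (List (String × String))) : List (List (List (String × String))) :=
  segGoA rows [] [] none

-- ===== PORT B =====
-- one step of the reverse loop: acc is the key-tagged accumulator, row the next row
-- (taken from the back); iterating reversed(rows) with this step is foldr over rows
def segStepB (row : List (String × String))
    (acc : List (String × List (List (String × String)))) :
    List (String × List (List (String × String))) :=
  let k := pvKey row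
  if k = "" then acc
  else
    match acc with
    | (k0, g) :: rest => if k0 = k then (k0, row :: g) :: rest else (k, [row]) :: (k0, g) :: rest
    | [] => [(k, [row])]

def segment_rows_py_alt (rows : List (List (String × String))) : List (List (List (String × String))) :=
  (rows.foldr segStepB []).map Prod.snd

-- ===== PRECONDITION & SPEC =====
def Spec_segment_rows_py (rows : List (List (String × String))) (out : List (List (List (String × String)))) : Prop := out = segment_rows_py_alt rows
instance (rows : List (List (String × String))) (out : List (List (List (String × String)))) : Decidable (Spec_segment_rows_py rows out) := by unfold Spec_segment_rows_py; infer_instance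

-- ===== CLAIM (what is proved, stated in full; the proofs are below) =====
def Claim_equal_segment_rows_py : Prop := ∀ (rows : List (List (String × String))), Dom_segment_rows_py rows → Spec_segment_rows_py rows (segment_rows_py rows)

-- ===== LEMMAS AND PROOFS =====

-- glue a pending nonempty run `cur` of key `k` onto a key-tagged accumulator
def pvAttach (cur : List (List (String × String))) (k : String)
    (acc : List (String × List (List (String × String)))) :
    List (String × List (List (String × String))) :=
  match acc with
  | [] => [(k, cur)]
  | (k0, g) :: rest => if k0 = k then (k, cur ++ g) :: rest else (k, cur) :: (k0, g) :: rest

theorem segStepB_eq (r : List (String × String))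
    (acc : List (String × List (List (String × String)))) (h : pvKey r ≠ "") :
    segStepB r acc = pvAttach [r] (pvKey r) acc := by
  cases acc with
  | nil => simp [segStepB, pvAttach, h]
  | cons p rest =>
    obtain ⟨k0, g⟩ := p
    simp only [segStepB, pvAttach, if_neg h]
    by_cases hk : k0 = pvKey r
    · subst hk; simp
    · simp [hk]

theorem pvAttach_attach_eq (cur : List (List (String × String))) (r : List (String × String))
    (acc : List (String × List (List (String × String)))) :
    pvAttach cur (pvKey r) (pvAttach [r] (pvKey r) acc) = pvAttach (cur ++ [r]) (pvKey r) acc := by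
  cases acc with
  | nil => simp [pvAttach]
  | cons p rest =>
    obtain ⟨k0, g⟩ := p
    simp only [pvAttach]
    by_cases hk : k0 = pvKey r
    · simp [hk]
    · simp [hk]

theorem pvAttach_attach_ne (cur : List (List (String × String))) (r : List (String × String))
    (k : String) (acc : List (String × List (List (String × String)))) (h : pvKey r ≠ k) :
    pvAttach cur k (pvAttach [r] (pvKey r) acc) = (k, cur) :: pvAttach [r] (pvKey r) acc := by
  cases acc with
  | nil => simp [pvAttach, h]
  | cons p rest =>
    obtain ⟨k0, g⟩ := p
    simp only [pvAttach]
    by_cases hk : k0 = pvKey r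
    · simp [hk, h]
    · simp [hk, h]

theorem segGoA_some (rows : List (List (String × String))) :
    ∀ (segs : List (List (List (String × String)))) (cur : List (List (String × String)))
      (k : String), cur ≠ [] →
      segGoA rows segs cur (some k)
        = segs ++ (pvAttach cur k (rows.foldr segStepB [])).map Prod.snd := by
  induction rows with
  | nil => intro segs cur k hc; simp [segGoA, pvAttach, hc]
  | cons r rest ih =>
    intro segs cur k hc
    by_cases hb : pvKey r = ""
    · simp [segGoA, hb, ih segs cur k hc, segStepB]
    · rw [List.foldr_cons, segStepB_eq r _ hb]
      by_cases hk : pvKey r = k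
      · subst hk
        have hnc : ¬ (cur ≠ [] ∧ some (pvKey r) ≠ some (pvKey r)) := by simp
        simp only [segGoA, if_neg hb, if_neg hnc]
        rw [ih segs (cur ++ [r]) (pvKey r) (by simp), pvAttach_attach_eq]
      · have hcond : cur ≠ [] ∧ some (pvKey r) ≠ some k := ⟨hc, by simpa using hk⟩
        simp only [segGoA, if_neg hb, if_pos hcond]
        rw [ih (segs ++ [cur]) [r] (pvKey r) (by simp), pvAttach_attach_ne cur r k _ hk]
        simp

theorem segGoA_none (rows : List (List (String × String))) :
    ∀ (segs : List (List (List (String × String)))),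
      segGoA rows segs [] none = segs ++ (rows.foldr segStepB []).map Prod.snd := by
  induction rows with
  | nil => intro segs; simp [segGoA]
  | cons r rest ih =>
    intro segs
    by_cases hb : pvKey r = ""
    · simp [segGoA, hb, ih segs, segStepB]
    · have hcond : ¬ (([] : List (List (String × String))) ≠ [] ∧ some (pvKey r) ≠ none) := by simp
      simp only [segGoA, if_neg hb, if_neg hcond, List.nil_append]
      rw [List.foldr_cons, segStepB_eq r _ hb,
        segGoA_some rest segs [r] (pvKey r) (by simp)]

-- ===== VERDICT (by name: the statement is the Claim_ definition above) =====
theorem segment_rows_py_spec : Claim_equal_segment_rows_py := by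
  intro rows _
  unfold Spec_segment_rows_py segment_rows_py segment_rows_py_alt
  simpa using segGoA_none rows []
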